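-- pv_equiv track=rewrite | github.com/filp8/algoritmi | algo2/esBackTracking/backTracking.py | contazerounoDin
-- ===== SOURCE A (Python) =====
-- def contazerounoDin(s):
--     T = [0]*len(s)
--     cntz = 0
--     lastOne = 0
--     for i in range(len(s)):
--         if s[i]=='0':
--             T[i]=T[lastOne]
--             cntz+=1
--         elif s[i]=='1':
--             if cntz!=0:
--                 T[i]=cntz+T[lastOne]
--                 lastOne = i
--     return T[-1]
-- ===== SOURCE B (Python) =====
-- def contazerounoDin(s):
--     zeros = 0
--     total = 0
--     for c in s:
--         if c == '0':
--             zeros += 1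
--         elif c == '1':
--             total += zeros
--     return total
-- ===== Notes on version B (the rewrite author's own statement) =====
-- stated objective: simpler
-- what changed: Replaced the DP array T and the lastOne back-pointer with a single pass over two scalars (a counter of zero characters seen so far and a running total of zero-then-one pairs); Pre_ excludes only the empty string, on which A raises IndexError.
-- intended difference: On nonempty strings whose last character is not a binary digit but which contain a zero character followed later by a one character, A returns 0 (its DP cell T[-1] is never written) while B returns the actual count of zero-then-one subsequence pairs, which is the intended value of the counter. — e.g. on contazerounoDin("01x"): A returns 0, B returns 1
import Mathlib
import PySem

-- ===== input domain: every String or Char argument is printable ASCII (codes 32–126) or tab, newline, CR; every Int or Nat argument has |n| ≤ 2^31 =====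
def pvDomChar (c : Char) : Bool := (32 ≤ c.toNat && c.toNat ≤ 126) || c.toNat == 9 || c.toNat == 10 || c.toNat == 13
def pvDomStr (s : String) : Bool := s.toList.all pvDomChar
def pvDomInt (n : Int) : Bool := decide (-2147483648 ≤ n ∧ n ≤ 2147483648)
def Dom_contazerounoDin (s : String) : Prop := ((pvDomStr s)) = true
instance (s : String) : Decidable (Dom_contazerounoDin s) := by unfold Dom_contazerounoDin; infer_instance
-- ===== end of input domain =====

-- B replaces A's DP array T and lastOne back-pointer with one pass over two scalars
-- (count of zero characters seen so far, running total of zero-then-one pairs); objective: simpler.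

-- ===== PORT A =====
-- one iteration of A's 'for i in range(len(s))' loop body; state = (T, cntz, lastOne)
def stepA (cs : List Char) (st : List Int × Int × Nat) (i : Nat) : List Int × Int × Nat :=
  match st with
  | (T, cntz, lastOne) =>
    if cs.getD i ' ' = '0' then (T.set i (T.getD lastOne 0), cntz + 1, lastOne)
    else if cs.getD i ' ' = '1' then
      if cntz ≠ 0 then (T.set i (cntz + T.getD lastOne 0), cntz, i)
      else (T, cntz, lastOne)
    else (T, cntz, lastOne)

def contazerounoDin (s : String) : Int :=
  let cs := s.toList
  let n := cs.length
  let res := (List.range n).foldl (stepA cs) (List.replicate n 0, 0, 0)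
  -- T[-1]: raises IndexError on the empty string (excluded by Pre_); the .getD 0 branch is never reached inside Pre_
  (PySem.List.pyGet? res.1 (-1)).getD 0

-- ===== PORT B =====
-- one iteration of B's 'for c in s' loop body; state = (zeros, total)
def stepB (p : Int × Int) (c : Char) : Int × Int :=
  if c = '0' then (p.1 + 1, p.2) else if c = '1' then (p.1, p.2 + p.1) else p

def contazerounoDin_alt (s : String) : Int :=
  (s.toList.foldl stepB (0, 0)).2

-- ===== PRECONDITION & SPEC =====
-- Pre_ excludes only the empty string, on which A raises IndexError (T[-1] on an empty list).
def Pre_contazerounoDin (s : String) : Prop := s ≠ ""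
instance (s : String) : Decidable (Pre_contazerounoDin s) := by unfold Pre_contazerounoDin; infer_instance
def pvWitness_contazerounoDin : String := "0101"

-- does the list contain a zero character followed (strictly later) by a one character?
def hasZTO : List Char → Bool
  | [] => false
  | c :: r => (c = '0' && r.contains '1') || hasZTO r

-- is the last element of the list not a binary digit?
def lastNonBinary (l : List Char) : Bool :=
  match l.getLast? with
  | some c => !(c = '0' || c = '1')
  | none => false

-- On nonempty strings whose last character is not a binary digit but which contain a zero
-- character followed later by a one character, A returns 0 (its DP cell T[-1] is never written)
-- while B returns the actual count of zero-then-one subsequence pairs, the counter's intended value.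
def D_contazerounoDin (s : String) : Prop :=
  lastNonBinary s.toList = true ∧ hasZTO s.toList = true
instance (s : String) : Decidable (D_contazerounoDin s) := by unfold D_contazerounoDin; infer_instance

def Spec_contazerounoDin (s : String) (out : Int) : Prop :=
  ¬ D_contazerounoDin s → out = contazerounoDin_alt s
instance (s : String) (out : Int) : Decidable (Spec_contazerounoDin s out) := by unfold Spec_contazerounoDin; infer_instance

def pvDiffWitness_contazerounoDin : String := "01x"
def pvDiffWitnessOut_contazerounoDin : Int × Int := (0, 1)

-- ===== CLAIM (what is proved, stated in full; the proofs are below) =====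
def Claim_unchanged_contazerounoDin : Prop := ∀ (s : String), Dom_contazerounoDin s → Pre_contazerounoDin s → Spec_contazerounoDin s (contazerounoDin s)
def Claim_changed_contazerounoDin : Prop := Dom_contazerounoDin (pvDiffWitness_contazerounoDin) ∧ Pre_contazerounoDin (pvDiffWitness_contazerounoDin) ∧ D_contazerounoDin (pvDiffWitness_contazerounoDin) ∧ contazerounoDin (pvDiffWitness_contazerounoDin) = pvDiffWitnessOut_contazerounoDin.1 ∧ contazerounoDin_alt (pvDiffWitness_contazerounoDin) = pvDiffWitnessOut_contazerounoDin.2 ∧ pvDiffWitnessOut_contazerounoDin.1 ≠ pvDiffWitnessOut_contazerounoDin.2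
def Claim_exact_contazerounoDin : Prop := ∀ (s : String), Dom_contazerounoDin s → Pre_contazerounoDin s → D_contazerounoDin s → contazerounoDin s ≠ contazerounoDin_alt s

-- ===== LEMMAS AND PROOFS =====

-- A's loop state after k iterations
def Astate (cs : List Char) (k : Nat) : List Int × Int × Nat :=
  (List.range k).foldl (stepA cs) (List.replicate cs.length 0, 0, 0)

-- B's fold over the first k characters
def Bfold (cs : List Char) (k : Nat) : Int × Int := (cs.take k).foldl stepB (0, 0)

lemma getD_set (T : List Int) (i j : Nat) (v : Int) :
    (T.set i v).getD j 0 = if j = i ∧ i < T.length then v else T.getD j 0 := by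
  simp [List.getD, List.getElem?_set]
  split_ifs with h1 h2 h3 h4 <;> simp_all

lemma Astate_succ (cs : List Char) (k : Nat) :
    Astate cs (k + 1) = stepA cs (Astate cs k) k := by
  unfold Astate; rw [List.range_succ, List.foldl_append]; rfl

lemma Bfold_succ (cs : List Char) (k : Nat) (hk : k < cs.length) :
    Bfold cs (k + 1) = stepB (Bfold cs k) (cs.getD k ' ') := by
  unfold Bfold
  rw [← List.take_concat_get' cs k hk, List.foldl_append]
  simp [List.getD, List.getElem?_eq_getElem hk]

lemma zeros_mono (l : List Char) : ∀ a b : Int, a ≤ (l.foldl stepB (a, b)).1 := by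
  induction l with
  | nil => intro a b; simp
  | cons c l ih =>
    intro a b
    simp only [List.foldl_cons, stepB]
    split_ifs
    · exact le_trans (by omega) (ih (a + 1) b)
    · exact ih a (b + a)
    · exact ih a b

lemma total_mono (l : List Char) : ∀ a b : Int, 0 ≤ a → b ≤ (l.foldl stepB (a, b)).2 := by
  induction l with
  | nil => intro a b _; simp
  | cons c l ih =>
    intro a b ha
    simp only [List.foldl_cons, stepB]
    split_ifs
    · exact ih (a + 1) b (by omega)
    · exact le_trans (by omega) (ih a (b + a) ha)
    · exact ih a b ha

-- if no zero character was counted, a later one character could add nothing: zeros = 0 at the end forces total = 0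
lemma Bfold_zero (l : List Char) (t : Int) (h : (l.foldl stepB (0, t)).1 = 0) :
    l.foldl stepB (0, t) = (0, t) := by
  induction l generalizing t with
  | nil => simp
  | cons c l ih =>
    by_cases h0 : c = '0'
    · exfalso
      have h1 : (l.foldl stepB (1, t)).1 = 0 := by
        simpa [stepB, h0] using h
      have := zeros_mono l 1 t
      omega
    · by_cases h1 : c = '1'
      · have h' : (l.foldl stepB (0, t + 0)).1 = 0 := by simpa [stepB, h0, h1] using h
        simpa [stepB, h0, h1] using ih (t + 0) h'
      · simpa [stepB, h0, h1] using ih t (by simpa [stepB, h0, h1] using h)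

-- with no one character left, the total never changes
lemma total_no_one (l : List Char) (h1 : l.contains '1' = false) :
    ∀ a b : Int, (l.foldl stepB (a, b)).2 = b := by
  induction l with
  | nil => intro a b; simp
  | cons c l ih =>
    intro a b
    simp only [List.contains_cons, Bool.or_eq_false_iff] at h1
    have hc1 : ¬ c = '1' := by
      intro h; rw [h] at h1; simp at h1
    simp only [List.foldl_cons, stepB, if_neg hc1]
    split_ifs <;> exact ih h1.2 _ _

-- no zero-then-one pattern and zeros = 0: the total never changes
lemma total_no_zto (l : List Char) (h : hasZTO l = false) (b : Int) :
    (l.foldl stepB (0, b)).2 = b := by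
  induction l generalizing b with
  | nil => simp
  | cons c l ih =>
    simp only [hasZTO, Bool.or_eq_false_iff, Bool.and_eq_false_iff] at h
    by_cases h0 : c = '0'
    · have hno1 : l.contains '1' = false := by
        rcases h.1 with h' | h'
        · simp [h0] at h'
        · exact h'
      simp only [List.foldl_cons, stepB, if_pos h0]
      exact total_no_one l hno1 _ _
    · by_cases h1 : c = '1'
      · simp only [List.foldl_cons, stepB, if_neg h0, if_pos h1]
        simpa using ih h.2 (b + 0)
      · simp only [List.foldl_cons, stepB, if_neg h0, if_neg h1]
        exact ih h.2 b
-- a one character with positive zeros on hand strictly raises the total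
lemma total_pos_one (l : List Char) (h1 : l.contains '1' = true) :
    ∀ a b : Int, 0 < a → b < (l.foldl stepB (a, b)).2 := by
  induction l with
  | nil => intro a b _; simp at h1
  | cons c l ih =>
    intro a b ha
    by_cases hc1 : c = '1'
    · have h0 : ¬ c = '0' := by rw [hc1]; decide
      simp only [List.foldl_cons, stepB, if_neg h0, if_pos hc1]
      have := total_mono l a (b + a) (by omega)
      omega
    · have h1' : l.contains '1' = true := by
        simp only [List.contains_cons] at h1
        rcases Bool.or_eq_true_iff.mp h1 with h | h
        · simp at h; exact absurd h.symm hc1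
        · exact h
      simp only [List.foldl_cons, stepB]
      split_ifs
      · exact ih h1' (a + 1) b (by omega)
      · exact ih h1' a b ha

-- a zero-then-one pattern strictly raises the total
lemma total_zto (l : List Char) (h : hasZTO l = true) :
    ∀ a b : Int, 0 ≤ a → b < (l.foldl stepB (a, b)).2 := by
  induction l with
  | nil => simp [hasZTO] at h
  | cons c l ih =>
    intro a b ha
    simp only [hasZTO, Bool.or_eq_true_iff, Bool.and_eq_true_iff] at h
    rcases h with ⟨hc0, h1⟩ | hr
    · have hc0' : c = '0' := by simpa using hc0
      simp only [List.foldl_cons, stepB, if_pos hc0']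
      exact total_pos_one l h1 (a + 1) b (by omega)
    · by_cases h0 : c = '0'
      · simp only [List.foldl_cons, stepB, if_pos h0]
        exact ih hr (a + 1) b (by omega)
      · by_cases h1 : c = '1'
        · simp only [List.foldl_cons, stepB, if_neg h0, if_pos h1]
          have := ih hr a (b + a) ha
          omega
        · simp only [List.foldl_cons, stepB, if_neg h0, if_neg h1]
          exact ih hr a b ha

-- main invariant of A's loop: cntz mirrors B's zeros, T[lastOne] mirrors B's total,
-- and the cells at indices ≥ k are still 0
lemma A_inv (cs : List Char) (k : Nat) (hk : k ≤ cs.length) :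
    (Astate cs k).1.length = cs.length ∧
    (Astate cs k).2.1 = (Bfold cs k).1 ∧
    ((Astate cs k).2.2 = 0 ∨ (Astate cs k).2.2 < k) ∧
    (Astate cs k).1.getD (Astate cs k).2.2 0 = (Bfold cs k).2 ∧
    (∀ j, k ≤ j → (Astate cs k).1.getD j 0 = 0) := by
  induction k with
  | zero =>
    refine ⟨by simp [Astate], by simp [Astate, Bfold], Or.inl (by simp [Astate]), ?_, ?_⟩
    · show (List.replicate cs.length (0:Int)).getD 0 0 = _
      simp [Bfold, List.getD]
    · intro j _
      show (List.replicate cs.length (0:Int)).getD j 0 = 0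
      simp [List.getD]
  | succ k ih =>
    have hk' : k < cs.length := by omega
    obtain ⟨hlen, hz, hL, hT, hreg⟩ := ih (by omega)
    rw [Astate_succ, Bfold_succ cs k hk']
    rcases hA : Astate cs k with ⟨T, z, L⟩
    rw [hA] at hlen hz hL hT hreg
    simp only at hlen hz hL hT hreg
    by_cases hc0 : cs.getD k ' ' = '0'
    · simp only [stepA, stepB, hc0, Char.reduceEq, reduceIte]
      refine ⟨by simp [hlen], by simp [hz], by rcases hL with h | h <;> [exact Or.inl h; exact Or.inr (by omega)], ?_, ?_⟩
      · show (T.set k (T.getD L 0)).getD L 0 = _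
        rw [getD_set]; split_ifs <;> simpa [List.getD] using hT
      · intro j hj
        rw [getD_set]
        have : ¬ (j = k ∧ k < T.length) := by omega
        rw [if_neg this]; exact hreg j (by omega)
    · by_cases hc1 : cs.getD k ' ' = '1'
      · by_cases hzz : z ≠ 0
        · simp only [stepA, stepB, hc1, Char.reduceEq, reduceIte, if_pos hzz]
          refine ⟨by simp [hlen], by simp [hz], Or.inr (Nat.lt_succ_self k), ?_, ?_⟩
          · show (T.set k (z + T.getD L 0)).getD k 0 = _
            rw [getD_set]
            rw [if_pos ⟨rfl, by omega⟩]
            simp only [hz, hT]; ring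
          · intro j hj
            rw [getD_set]
            have : ¬ (j = k ∧ k < T.length) := by omega
            rw [if_neg this]; exact hreg j (by omega)
        · simp only [stepA, stepB, hc1, Char.reduceEq, reduceIte, if_neg hzz]
          rw [not_not] at hzz
          refine ⟨hlen, by simp [hz], by omega, ?_, fun j hj => hreg j (by omega)⟩
          have hz0 : (Bfold cs k).1 = 0 := by rw [← hz, hzz]
          have : Bfold cs k = (0, 0) := by
            have := Bfold_zero (cs.take k) 0
            simp only [Bfold] at hz0 ⊢
            have h2 := Bfold_zero (cs.take k) 0 hz0
            simpa using h2
          rw [this] at hT ⊢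
          simpa using hT
      · simp only [stepA, stepB, if_neg hc0, if_neg hc1]
        exact ⟨hlen, hz, by omega, hT, fun j hj => hreg j (by omega)⟩

-- both port values expressed by the shared invariants, on a nonempty string
lemma ports_eval (s : String) (m : Nat) (hm : s.toList.length = m + 1) :
    contazerounoDin_alt s = (Bfold s.toList (m + 1)).2 ∧
    contazerounoDin s = (PySem.List.pyGet? (stepA s.toList (Astate s.toList m) m).1 (-1)).getD 0 := by
  constructor
  · unfold contazerounoDin_alt
    simp only [Bfold, ← hm, List.take_length]
  · show (PySem.List.pyGet? (Astate s.toList s.toList.length).1 (-1)).getD 0 = _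
    rw [hm, Astate_succ]

-- T[-1] of a full-length table is its cell m
lemma pyGet_last (cs : List Char) (m : Nat) (hm : cs.length = m + 1)
    (T' : List Int) (hT' : T'.length = cs.length) :
    (PySem.List.pyGet? T' (-1)).getD 0 = T'.getD m 0 := by
  rw [PySem.List.pyGet?_neg_one, List.getLast?_eq_getElem?, hT', hm]
  simp [List.getD]

-- the shared case analysis on the last character: A's value vs B's partial fold
lemma main_cases (s : String) (m : Nat) (hm : s.toList.length = m + 1) :
    (contazerounoDin s =
      (if s.toList.getD m ' ' = '0' ∨ s.toList.getD m ' ' = '1'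
        then (Bfold s.toList (m + 1)).2 else 0)) := by
  obtain ⟨_, hA⟩ := ports_eval s m hm
  set cs := s.toList with hcs
  obtain ⟨hlen, hz, hL, hT, hreg⟩ := A_inv cs m (by omega)
  have hBn : Bfold cs (m + 1) = stepB (Bfold cs m) (cs.getD m ' ') :=
    Bfold_succ cs m (by omega)
  rcases hSt : Astate cs m with ⟨T, z, L⟩
  rw [hSt] at hlen hz hL hT hreg hA
  simp only at hlen hz hL hT hreg
  rw [hA, hBn]
  by_cases hc0 : cs.getD m ' ' = '0'
  · have hc0' : cs[m]?.getD ' ' = '0' := hc0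
    have hstep : stepA cs (T, z, L) m = (T.set m (T.getD L 0), z + 1, L) := by
      simp [stepA, hc0']
    rw [hstep, pyGet_last cs m hm _ (by simp [hlen]), getD_set, if_pos ⟨rfl, by omega⟩,
      if_pos (Or.inl hc0)]
    have hsB : stepB (Bfold cs m) (cs.getD m ' ') = ((Bfold cs m).1 + 1, (Bfold cs m).2) := by
      simp [stepB, hc0']
    rw [hsB]
    exact hT
  · have hc0' : ¬ cs[m]?.getD ' ' = '0' := hc0
    by_cases hc1 : cs.getD m ' ' = '1'
    · have hc1' : cs[m]?.getD ' ' = '1' := hc1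
      have hsB : stepB (Bfold cs m) (cs.getD m ' ')
          = ((Bfold cs m).1, (Bfold cs m).2 + (Bfold cs m).1) := by
        simp [stepB, hc1']
      by_cases hzz : z ≠ 0
      · have hstep : stepA cs (T, z, L) m = (T.set m (z + T.getD L 0), z, m) := by
          simp [stepA, hc1', hzz]
        rw [hstep, pyGet_last cs m hm _ (by simp [hlen]), getD_set, if_pos ⟨rfl, by omega⟩,
          if_pos (Or.inr hc1), hsB]
        show z + T.getD L 0 = (Bfold cs m).2 + (Bfold cs m).1
        rw [hz, hT]; ring
      · rw [not_not] at hzz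
        have hstep : stepA cs (T, z, L) m = (T, z, L) := by
          simp [stepA, hc1', hzz]
        rw [hstep, pyGet_last cs m hm _ hlen, hreg m le_rfl, if_pos (Or.inr hc1), hsB]
        show (0 : Int) = (Bfold cs m).2 + (Bfold cs m).1
        have hz0 : (Bfold cs m).1 = 0 := by rw [← hz, hzz]
        have hB0 : Bfold cs m = (0, 0) := by
          simp only [Bfold] at hz0 ⊢
          simpa using Bfold_zero (cs.take m) 0 hz0
        rw [hB0]; norm_num
    · have hc1' : ¬ cs[m]?.getD ' ' = '1' := hc1
      have hstep : stepA cs (T, z, L) m = (T, z, L) := by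
        simp [stepA, hc0', hc1']
      rw [hstep, pyGet_last cs m hm _ hlen, hreg m le_rfl, if_neg (by tauto)]

lemma last_eq_getD (cs : List Char) (m : Nat) (hm : cs.length = m + 1) :
    cs.getLast? = some (cs.getD m ' ') := by
  rw [List.getLast?_eq_getElem?, hm]
  simp [List.getD, List.getElem?_eq_getElem (by omega : m < cs.length)]

lemma nonempty_len (s : String) (h : s ≠ "") : ∃ m, s.toList.length = m + 1 := by
  cases hl : s.toList.length with
  | zero =>
    exact absurd (String.toList_eq_nil_iff.mp (List.length_eq_zero_iff.mp hl)) h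
  | succ m => exact ⟨m, rfl⟩

-- ===== VERDICT (by name: the statements are the Claim_ definitions above) =====
theorem contazerounoDin_spec : Claim_unchanged_contazerounoDin := by
  intro s _ hpre
  unfold Spec_contazerounoDin
  intro hnD
  obtain ⟨m, hm⟩ := nonempty_len s hpre
  obtain ⟨hB, _⟩ := ports_eval s m hm
  rw [main_cases s m hm, hB]
  by_cases hc : s.toList.getD m ' ' = '0' ∨ s.toList.getD m ' ' = '1'
  · rw [if_pos hc]
  · rw [if_neg hc]
    have hlast : lastNonBinary s.toList = true := by
      unfold lastNonBinary
      rw [last_eq_getD s.toList m hm]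
      simpa using hc
    have hzto : hasZTO s.toList = false := by
      by_contra h
      exact hnD ⟨hlast, by simpa using h⟩
    unfold Bfold
    rw [← hm, List.take_length]
    exact (total_no_zto s.toList hzto 0).symm

theorem contazerounoDin_changed : Claim_changed_contazerounoDin := by
  unfold Claim_changed_contazerounoDin; decide

theorem contazerounoDin_tight : Claim_exact_contazerounoDin := by
  intro s _ hpre hD
  obtain ⟨hlast, hzto⟩ := hD
  obtain ⟨m, hm⟩ := nonempty_len s hpre
  obtain ⟨hB, _⟩ := ports_eval s m hm
  have hc : ¬ (s.toList.getD m ' ' = '0' ∨ s.toList.getD m ' ' = '1') := by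
    unfold lastNonBinary at hlast
    rw [last_eq_getD s.toList m hm] at hlast
    simpa using hlast
  rw [main_cases s m hm, if_neg hc, hB]
  have : (0 : Int) < (Bfold s.toList (m + 1)).2 := by
    unfold Bfold
    rw [← hm, List.take_length]
    exact total_zto s.toList hzto 0 0 le_rfl
  omega
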